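-- pv_equiv track=rewrite | github.com/gmpommier/epreuve_pratique | exercice_22_1.py | recherche_indices_classement
-- ===== SOURCE A (Python) =====
-- def recherche_indices_classement(elt, tab):
--     ind_inf = []
--     ind_egal = []
--     ind_sup = []
--     for i in range(len(tab)):
--         if tab[i] < elt:
--             ind_inf.append(i)
--         elif tab[i] > elt:
--             ind_sup.append(i)
--         else:
--             ind_egal.append(i)
--     return (ind_inf, ind_egal, ind_sup)
-- ===== SOURCE B (Python) =====
-- def recherche_indices_classement(elt, tab):
--     pairs = list(enumerate(tab))
--     return ([i for i, v in pairs if v < elt],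
--             [i for i, v in pairs if v == elt],
--             [i for i, v in pairs if v > elt])
-- ===== Notes on version B (the rewrite author's own statement) =====
-- stated objective: idiomatic
-- what changed: Replaces the single three-way-branching index loop with three independent comprehension scans over enumerate(tab), one per relation.
import Mathlib
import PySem

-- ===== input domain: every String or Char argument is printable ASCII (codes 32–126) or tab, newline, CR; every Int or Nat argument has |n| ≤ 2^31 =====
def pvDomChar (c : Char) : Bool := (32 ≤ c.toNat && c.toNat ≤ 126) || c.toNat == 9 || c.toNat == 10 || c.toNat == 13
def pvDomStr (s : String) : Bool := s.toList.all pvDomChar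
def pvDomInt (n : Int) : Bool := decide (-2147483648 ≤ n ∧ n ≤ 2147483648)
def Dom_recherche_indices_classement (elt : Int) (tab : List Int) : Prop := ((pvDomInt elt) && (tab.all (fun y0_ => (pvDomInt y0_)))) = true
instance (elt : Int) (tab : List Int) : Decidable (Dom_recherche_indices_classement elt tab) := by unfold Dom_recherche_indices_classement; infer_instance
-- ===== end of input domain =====

-- B: three independent comprehension scans over enumerate(tab), one per relation,
-- instead of A's single three-way-branching index loop (objective: idiomatic).


-- ===== PORT A =====
-- for i in range(len(tab)): tab[i] is always in range, so pyGetD is exact here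
def recherche_indices_classement (elt : Int) (tab : List Int) : List Int × List Int × List Int :=
  let r := (PySem.List.pyRange 0 (PySem.List.len tab) 1).foldl
    (fun (acc : List Int × List Int × List Int) i =>
      let v := PySem.List.pyGetD tab i 0
      if v < elt then (acc.1 ++ [i], acc.2.1, acc.2.2)
      else if v > elt then (acc.1, acc.2.1, acc.2.2 ++ [i])
      else (acc.1, acc.2.1 ++ [i], acc.2.2))
    ([], [], [])
  (r.1, r.2.1, r.2.2)

-- ===== PORT B =====
def recherche_indices_classement_alt (elt : Int) (tab : List Int) : List Int × List Int × List Int :=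
  let pairs := PySem.List.enumerate tab
  (pairs.filterMap (fun p => if p.2 < elt then some p.1 else none),
   pairs.filterMap (fun p => if p.2 = elt then some p.1 else none),
   pairs.filterMap (fun p => if p.2 > elt then some p.1 else none))

-- ===== PRECONDITION & SPEC =====
def Spec_recherche_indices_classement (elt : Int) (tab : List Int) (out : List Int × List Int × List Int) : Prop := out = recherche_indices_classement_alt elt tab
instance (elt : Int) (tab : List Int) (out : List Int × List Int × List Int) : Decidable (Spec_recherche_indices_classement elt tab out) := by unfold Spec_recherche_indices_classement; infer_instance

-- ===== CLAIM (what is proved, stated in full; the proofs are below) =====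
def Claim_equal_recherche_indices_classement : Prop := ∀ (elt : Int) (tab : List Int), Dom_recherche_indices_classement elt tab → Spec_recherche_indices_classement elt tab (recherche_indices_classement elt tab)

-- ===== LEMMAS AND PROOFS =====

-- The three-way index fold splits into the three filterMaps, for any accumulators.
theorem foldl_split (elt : Int) (f : Int → Int) (l : List Int) (a b c : List Int) :
    l.foldl
      (fun (acc : List Int × List Int × List Int) i =>
        if f i < elt then (acc.1 ++ [i], acc.2.1, acc.2.2)
        else if f i > elt then (acc.1, acc.2.1, acc.2.2 ++ [i])
        else (acc.1, acc.2.1 ++ [i], acc.2.2))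
      (a, b, c)
    = (a ++ l.filterMap (fun i => if f i < elt then some i else none),
       b ++ l.filterMap (fun i => if f i = elt then some i else none),
       c ++ l.filterMap (fun i => if f i > elt then some i else none)) := by
  induction l generalizing a b c with
  | nil => simp
  | cons p t ih =>
    simp only [List.foldl_cons, List.filterMap_cons]
    by_cases h1 : f p < elt
    · simp [h1, if_neg (show ¬ elt < f p by omega),
            if_neg (show ¬ (f p = elt) by omega), ih]
    · by_cases h2 : elt < f p
      · simp [h1, h2, if_neg (show ¬ (f p = elt) by omega), ih]
      · have h3 : f p = elt := by omega
        simp [h1, h2, h3, ih]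

-- ===== VERDICT (by name: the statement is the Claim_ definition above) =====
theorem recherche_indices_classement_spec : Claim_equal_recherche_indices_classement := by
  intro elt tab _
  unfold Spec_recherche_indices_classement recherche_indices_classement recherche_indices_classement_alt
  have he := PySem.List.enumerate_eq_map_pyRange (xs := tab) (d := 0)
  simp only [PySem.List.len_eq] at he ⊢
  rw [he, List.filterMap_map, List.filterMap_map, List.filterMap_map,
      foldl_split elt (fun i => PySem.List.pyGetD tab i 0)]
  simp [Function.comp]
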